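-- pv_equiv track=rewrite | github.com/Auclown/algo-challenge-py | 074_matrix-element-sum/attempt.py | matrix_element_sum
-- ===== SOURCE A (Python) =====
-- def matrix_element_sum(matrix):
--     result = 0
--     zero_indices = []
--
--     for i in range(len(matrix)):
--         for j in range(len(matrix[i])):
--             if (matrix[i][j] == 0):
--                 zero_indices.append(j)
--             elif (not j in zero_indices):
--                 result += matrix[i][j]
--
--     return result
-- ===== SOURCE B (Python) =====
-- def matrix_element_sum(matrix):
--     cols = max((len(row) for row in matrix), default=0)
--     total = 0
--     for j in range(cols):
--         for row in matrix:
--             if j >= len(row):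
--                 continue
--             v = row[j]
--             if v == 0:
--                 break
--             total += v
--     return total
-- ===== Notes on version B (the rewrite author's own statement) =====
-- stated objective: alternative
-- what changed: B scans the matrix column-major, breaking at the first zero in each column, instead of A's row-major scan that accumulates a list of poisoned column indices and tests membership per cell.
import Mathlib
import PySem

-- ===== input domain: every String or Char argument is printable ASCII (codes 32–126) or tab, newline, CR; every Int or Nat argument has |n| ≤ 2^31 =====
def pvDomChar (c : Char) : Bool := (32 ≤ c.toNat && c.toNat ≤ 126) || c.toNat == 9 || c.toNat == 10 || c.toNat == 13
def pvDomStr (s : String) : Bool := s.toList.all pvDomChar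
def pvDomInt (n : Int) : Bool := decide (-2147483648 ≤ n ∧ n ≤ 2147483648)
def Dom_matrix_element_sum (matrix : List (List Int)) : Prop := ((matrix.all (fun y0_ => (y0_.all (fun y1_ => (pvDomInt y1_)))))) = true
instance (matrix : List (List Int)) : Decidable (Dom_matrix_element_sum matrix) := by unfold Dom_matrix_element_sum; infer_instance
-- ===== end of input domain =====

-- B replaces A's row-major scan with a poisoned-column index list by a column-major
-- scan that breaks at the first zero in each column (objective: alternative algorithm).

-- ===== PORT A =====
-- inner loop: for j in range(len(row)): if row[j]==0: zero_indices.append(j)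
--             elif not j in zero_indices: result += row[j]
def pvRowLoopA : List Int → Nat → Int × List Nat → Int × List Nat
  | [], _, st => st
  | v :: rest, j, st =>
    pvRowLoopA rest (j + 1)
      (if v = 0 then (st.1, st.2 ++ [j])
       else if j ∈ st.2 then st
       else (st.1 + v, st.2))

-- outer loop: for i in range(len(matrix)): …
def pvMatLoopA : List (List Int) → Int × List Nat → Int × List Nat
  | [], st => st
  | r :: rs, st => pvMatLoopA rs (pvRowLoopA r 0 st)

def matrix_element_sum (matrix : List (List Int)) : Int :=
  (pvMatLoopA matrix (0, [])).1

-- ===== PORT B =====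
-- inner loop: for row in matrix: if j >= len(row): continue; v = row[j];
--             if v == 0: break; total += v
def pvColLoopB : List (List Int) → Nat → Int → Int
  | [], _, acc => acc
  | r :: rs, j, acc =>
    if j < r.length then
      if r.getD j 0 = 0 then acc
      else pvColLoopB rs j (acc + r.getD j 0)
    else pvColLoopB rs j acc

def matrix_element_sum_alt (matrix : List (List Int)) : Int :=
  let cols := matrix.foldl (fun c r => max c r.length) 0
  (List.range cols).foldl (fun acc j => pvColLoopB matrix j acc) 0

-- ===== PRECONDITION & SPEC =====
def Spec_matrix_element_sum (matrix : List (List Int)) (out : Int) : Prop := out = matrix_element_sum_alt matrix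
instance (matrix : List (List Int)) (out : Int) : Decidable (Spec_matrix_element_sum matrix out) := by unfold Spec_matrix_element_sum; infer_instance

-- ===== CLAIM (what is proved, stated in full; the proofs are below) =====
def Claim_equal_matrix_element_sum : Prop := ∀ (matrix : List (List Int)), Dom_matrix_element_sum matrix → Spec_matrix_element_sum matrix (matrix_element_sum matrix)

-- ===== LEMMAS AND PROOFS =====

-- per-column sum, stopping at the first in-range zero
def colSum : List (List Int) → Nat → Int
  | [], _ => 0
  | r :: rs, j =>
    if j < r.length then
      (if r.getD j 0 = 0 then 0 else r.getD j 0 + colSum rs j)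
    else colSum rs j

-- maximal row length, recursively
def maxLen : List (List Int) → Nat
  | [] => 0
  | r :: rs => max r.length (maxLen rs)

-- zero indices appended by one row, starting at offset k
def zeroIdx : List Int → Nat → List Nat
  | [], _ => []
  | v :: rest, k => (if v = 0 then [k] else []) ++ zeroIdx rest (k + 1)

lemma colLoopB_eq (rows : List (List Int)) (j : Nat) :
    ∀ acc, pvColLoopB rows j acc = acc + colSum rows j := by
  induction rows with
  | nil => intro acc; simp [pvColLoopB, colSum]
  | cons r rs ih =>
    intro acc
    simp only [pvColLoopB, colSum]
    split_ifs with h1 h2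
    · ring
    · rw [ih]; ring
    · rw [ih]

lemma foldl_max_eq (rows : List (List Int)) :
    ∀ a, rows.foldl (fun c r => max c r.length) a = max a (maxLen rows) := by
  induction rows with
  | nil => intro a; simp [maxLen]
  | cons r rs ih => intro a; simp [maxLen, ih, Nat.max_assoc]

lemma colSum_zero_of_ge (rows : List (List Int)) (j : Nat) (h : maxLen rows ≤ j) :
    colSum rows j = 0 := by
  induction rows with
  | nil => simp [colSum]
  | cons r rs ih =>
    simp only [maxLen, Nat.max_le] at h
    simp [colSum, Nat.not_lt.mpr h.1, ih h.2]

lemma mem_zeroIdx (r : List Int) : ∀ (k j : Nat),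
    j ∈ zeroIdx r k ↔ ∃ i, i < r.length ∧ r.getD i 0 = 0 ∧ j = k + i := by
  induction r with
  | nil => intro k j; simp [zeroIdx]
  | cons v rest ih =>
    intro k j
    simp only [zeroIdx, List.mem_append, ih]
    constructor
    · rintro (h | ⟨i, hi, hz, rfl⟩)
      · refine ⟨0, by simp, ?_, ?_⟩
        · split_ifs at h with hv
          · simpa [hv]
          · simp at h
        · split_ifs at h with hv
          · simp at h; omega
          · simp at h
      · exact ⟨i + 1, by simpa using hi, by simpa using hz, by omega⟩
    · rintro ⟨i, hi, hz, rfl⟩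
      cases i with
      | zero => left; simp at hz; simp [hz]
      | succ i =>
        right
        exact ⟨i, by simpa using hi, by simpa using hz, by omega⟩

-- row loop: final accumulator and final zero-index list
lemma rowLoopA_spec (r : List Int) : ∀ (k : Nat) (acc : Int) (zi : List Nat),
    pvRowLoopA r k (acc, zi)
      = (acc + ∑ i ∈ Finset.range r.length,
            (if (k + i) ∈ zi then 0 else
              if r.getD i 0 = 0 then 0 else r.getD i 0),
         zi ++ zeroIdx r k) := by
  induction r with
  | nil => intro k acc zi; simp [pvRowLoopA, zeroIdx]
  | cons v rest ih =>
    intro k acc zi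
    have hidx : ∀ i : Nat, k + 1 + i = k + (i + 1) := fun i => by omega
    simp only [pvRowLoopA, zeroIdx, List.length_cons]
    rw [Finset.sum_range_succ']
    simp only [List.getD_cons_zero, List.getD_cons_succ, Nat.add_zero]
    by_cases hv : v = 0
    · rw [if_pos hv, ih]
      simp only [Prod.mk.injEq]
      refine ⟨?_, by simp [hv, List.append_assoc]⟩
      have hcg : (∑ i ∈ Finset.range rest.length,
            (if k + 1 + i ∈ zi ++ [k] then (0 : Int) else
              if rest.getD i 0 = 0 then 0 else rest.getD i 0))
          = ∑ i ∈ Finset.range rest.length,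
            (if k + (i + 1) ∈ zi then (0 : Int) else
              if rest.getD i 0 = 0 then 0 else rest.getD i 0) := by
        refine Finset.sum_congr rfl (fun i _ => ?_)
        have hm : (k + 1 + i ∈ zi ++ [k]) ↔ (k + (i + 1) ∈ zi) := by
          rw [hidx i]
          have hne : ¬ k + (i + 1) = k := by omega
          simp [List.mem_append, hne]
        simp only [hm]
      rw [hcg]
      simp [hv]
    · rw [if_neg hv]
      have hcg : (∑ i ∈ Finset.range rest.length,
            (if k + 1 + i ∈ zi then (0 : Int) else
              if rest.getD i 0 = 0 then 0 else rest.getD i 0))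
          = ∑ i ∈ Finset.range rest.length,
            (if k + (i + 1) ∈ zi then (0 : Int) else
              if rest.getD i 0 = 0 then 0 else rest.getD i 0) := by
        refine Finset.sum_congr rfl (fun i _ => ?_)
        rw [hidx i]
      by_cases hm : k ∈ zi
      · rw [if_pos hm, ih, hcg]
        simp [hm, hv]
      · rw [if_neg hm, ih, hcg]
        simp only [Prod.mk.injEq]
        refine ⟨by rw [if_neg hm, if_neg hv]; ring, by simp [hv]⟩

-- main invariant: processing the remaining rows from state (acc, zi)
lemma matLoopA_spec (rows : List (List Int)) : ∀ (acc : Int) (zi : List Nat),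
    (pvMatLoopA rows (acc, zi)).1
      = acc + ∑ j ∈ Finset.range (maxLen rows),
          (if j ∈ zi then 0 else colSum rows j) := by
  induction rows with
  | nil => intro acc zi; simp [pvMatLoopA, maxLen]
  | cons r rs ih =>
    intro acc zi
    simp only [pvMatLoopA, maxLen]
    rw [rowLoopA_spec, ih]
    have hB : ∀ j : Nat, (j ∈ zi ++ zeroIdx r 0) ↔ (j ∈ zi ∨ (j < r.length ∧ r.getD j 0 = 0)) := by
      intro j
      simp only [List.mem_append, mem_zeroIdx]
      constructor
      · rintro (h | ⟨i, h1, h2, h3⟩)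
        · exact Or.inl h
        · have : i = j := by omega
          subst this
          exact Or.inr ⟨h1, h2⟩
      · rintro (h | ⟨h1, h2⟩)
        · exact Or.inl h
        · exact Or.inr ⟨j, h1, h2, by omega⟩
    have hsplit : (∑ j ∈ Finset.range (max r.length (maxLen rs)),
          (if j ∈ zi then (0 : Int) else colSum (r :: rs) j))
        = (∑ j ∈ Finset.range (max r.length (maxLen rs)),
            (if j ∈ zi then (0 : Int) else if j < r.length then
              (if r.getD j 0 = 0 then 0 else r.getD j 0) else 0))
          + ∑ j ∈ Finset.range (max r.length (maxLen rs)),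
            (if j ∈ zi ++ zeroIdx r 0 then (0 : Int) else colSum rs j) := by
      rw [← Finset.sum_add_distrib]
      refine Finset.sum_congr rfl (fun j _ => ?_)
      by_cases h1 : j ∈ zi
      · simp [h1, hB]
      · by_cases h2 : j < r.length
        · simp only [colSum, if_pos h2, hB, h1, false_or]
          rw [List.getD_eq_getElem _ _ h2]
          by_cases h3 : r[j] = 0
          · simp [h2, h3, List.getD_eq_getElem]
          · simp [h2, h3, List.getD_eq_getElem]
        · simp only [colSum, if_neg h2, hB, h1, false_or]
          simp [h2]
    have hA : (∑ j ∈ Finset.range (max r.length (maxLen rs)),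
          (if j ∈ zi then (0 : Int) else if j < r.length then
            (if r.getD j 0 = 0 then 0 else r.getD j 0) else 0))
        = ∑ i ∈ Finset.range r.length,
            (if (0 + i) ∈ zi then (0 : Int) else
              if r.getD i 0 = 0 then 0 else r.getD i 0) := by
      rw [← Finset.sum_subset (Finset.range_subset.mpr (fun x hx => Finset.mem_range.mpr (lt_of_lt_of_le hx (Nat.le_max_left r.length (maxLen rs)))))
          (fun x _ hx => ?_)]
      · refine Finset.sum_congr rfl (fun j hj => ?_)
        have hjl : j < r.length := Finset.mem_range.mp hj
        simp [hjl, Nat.zero_add]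
      · have : ¬ x < r.length := by
          simpa using hx
        simp [this]
    have hBs : (∑ j ∈ Finset.range (max r.length (maxLen rs)),
          (if j ∈ zi ++ zeroIdx r 0 then (0 : Int) else colSum rs j))
        = ∑ j ∈ Finset.range (maxLen rs),
            (if j ∈ zi ++ zeroIdx r 0 then (0 : Int) else colSum rs j) := by
      rw [← Finset.sum_subset (Finset.range_subset.mpr (fun x hx => Finset.mem_range.mpr (lt_of_lt_of_le hx (Nat.le_max_right r.length (maxLen rs)))))
          (fun x _ hx => ?_)]
      have hge : maxLen rs ≤ x := by
        simpa using hx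
      rw [colSum_zero_of_ge rs x hge]
      simp
    rw [hsplit, hA, hBs]
    ring

-- ===== VERDICT (by name: the statement is the Claim_ definition above) =====
theorem matrix_element_sum_spec : Claim_equal_matrix_element_sum := by
  intro matrix _
  unfold Spec_matrix_element_sum matrix_element_sum matrix_element_sum_alt
  rw [matLoopA_spec, foldl_max_eq]
  have hfold : ∀ (n : Nat) (acc : Int),
      (List.range n).foldl (fun acc j => pvColLoopB matrix j acc) acc
        = acc + ∑ j ∈ Finset.range n, colSum matrix j := by
    intro n
    induction n with
    | zero => intro acc; simp
    | succ n ih2 =>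
      intro acc
      rw [List.range_succ, List.foldl_append, ih2, Finset.sum_range_succ]
      simp only [List.foldl_cons, List.foldl_nil, colLoopB_eq]
      ring
  simp only [hfold, Nat.zero_max]
  simp
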